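-- pv_equiv track=rewrite | github.com/manwar/perlweeklychallenge-club | challenge-282/lubos-kolouch/python/ch-1.py | good_integer
-- ===== SOURCE A (Python) =====
-- def good_integer(value: int) -> str:
--     """Return the first good 3-digit substring, or '-1' if none exists.
--
--     A good integer contains exactly three consecutive matching digits that are
--     not part of a longer run of that same digit.
--     """
--     s = str(value)
--     n = len(s)
--     if n < 3:
--         return "-1"
--
--     for i in range(n - 2):
--         d = s[i]
--         if s[i + 1] != d or s[i + 2] != d:
--             continue
--
--         prev_ok = i == 0 or s[i - 1] != d
--         next_ok = i + 3 >= n or s[i + 3] != d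
--         if prev_ok and next_ok:
--             return d * 3
--
--     return "-1"
-- ===== SOURCE B (Python) =====
-- def good_integer(value: int) -> str:
--     """Run-based scan: jump over maximal runs; return d*3 for the first run of length exactly 3."""
--     s = str(value)
--     while s:
--         d = s[0]
--         run = len(s) - len(s.lstrip(d))
--         if run == 3:
--             return d * 3
--         s = s[run:]
--     return "-1"
-- ===== Notes on version B (the rewrite author's own statement) =====
-- stated objective: simpler
-- what changed: Replaced A's index-by-index 3-window scan with prev/next boundary checks by a run-by-run loop that measures each maximal run once (via lstrip) and returns d*3 for the first run of length exactly 3.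
import Mathlib
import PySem

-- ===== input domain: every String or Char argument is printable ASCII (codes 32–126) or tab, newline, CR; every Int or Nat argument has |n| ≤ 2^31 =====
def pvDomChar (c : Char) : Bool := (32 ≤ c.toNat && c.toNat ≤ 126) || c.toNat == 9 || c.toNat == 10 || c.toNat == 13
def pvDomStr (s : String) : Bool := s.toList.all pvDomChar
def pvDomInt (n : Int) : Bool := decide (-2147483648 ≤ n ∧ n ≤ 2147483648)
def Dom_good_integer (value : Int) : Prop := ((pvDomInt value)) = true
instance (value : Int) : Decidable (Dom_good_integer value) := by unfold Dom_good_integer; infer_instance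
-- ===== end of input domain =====

-- B replaces A's index-by-index window scan with a run-by-run scan (jump over each maximal
-- run, return d*3 for the first run of length exactly 3); objective: simpler.

-- ===== PORT A =====
-- literal port of A's `for i in range(n-2)` loop; all list accesses are in range
-- under the `i + 2 < cs.length` guard / the short-circuit guards, so getD is exact.
def goodIntLoopA (cs : List Char) (i : Nat) : String :=
  if i + 2 < cs.length then
    let d := cs.getD i ' '
    if cs.getD (i+1) ' ' ≠ d ∨ cs.getD (i+2) ' ' ≠ d then
      goodIntLoopA cs (i+1)
    else if (i = 0 ∨ cs.getD (i-1) ' ' ≠ d) ∧ (cs.length ≤ i + 3 ∨ cs.getD (i+3) ' ' ≠ d) then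
      String.mk [d, d, d]
    else
      goodIntLoopA cs (i+1)
  else "-1"
termination_by cs.length - i

def good_integer (value : Int) : String :=
  let s := PySem.Int.toStr value
  let cs := s.toList
  if cs.length < 3 then "-1"
  else goodIntLoopA cs 0

-- ===== PORT B =====
-- literal port of Source B's run loop: `run = len(s) - len(s.lstrip(d))` is
-- 1 + takeWhile-length, `s = s[run:]` is dropWhile of the tail.
def goodIntLoopB : List Char → String
  | [] => "-1"
  | d :: rest =>
    let run := (rest.takeWhile (· == d)).length + 1
    if run = 3 then String.mk [d, d, d]
    else goodIntLoopB (rest.dropWhile (· == d))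
termination_by l => l.length
decreasing_by
  simp only [List.length_cons]
  exact Nat.lt_succ_of_le (rest.length_dropWhile_le _)

def good_integer_alt (value : Int) : String :=
  goodIntLoopB (PySem.Int.toStr value).toList

-- ===== PRECONDITION & SPEC =====
def Spec_good_integer (value : Int) (out : String) : Prop := out = good_integer_alt value
instance (value : Int) (out : String) : Decidable (Spec_good_integer value out) := by unfold Spec_good_integer; infer_instance

-- ===== CLAIM (what is proved, stated in full; the proofs are below) =====
def Claim_equal_good_integer : Prop := ∀ (value : Int), Dom_good_integer value → Spec_good_integer value (good_integer value)

-- ===== LEMMAS AND PROOFS =====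


-- structural reformulation of A's index loop: scan windows of three with the previous char
def scanA (p : Option Char) : List Char → String
  | a :: b :: c :: rest =>
    if b = a ∧ c = a ∧ p ≠ some a ∧ rest.head? ≠ some a then String.mk [a, a, a]
    else scanA (some a) (b :: c :: rest)
  | _ => "-1"

theorem scanA_short (p : Option Char) (l : List Char) (h : l.length < 3) :
    scanA p l = "-1" := by
  match l with
  | [] => simp [scanA]
  | [a] => simp [scanA]
  | [a, b] => simp [scanA]
  | a :: b :: c :: t => simp at h; omega

theorem scanA_cons_self (c : Char) (l : List Char) :
    scanA (some c) (c :: l) = scanA (some c) l := by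
  match l with
  | [] => simp [scanA]
  | [x] => simp [scanA]
  | x :: y :: t => simp [scanA]

theorem scanA_replicate_prev (c : Char) (k : Nat) (rest : List Char) :
    scanA (some c) (List.replicate k c ++ rest) = scanA (some c) rest := by
  induction k with
  | zero => simp
  | succ n ih => rw [List.replicate_succ, List.cons_append, scanA_cons_self, ih]

theorem scanA_run (c : Char) (k : Nat) (rest : List Char) (p : Option Char)
    (hk : 1 ≤ k) (hr : rest.head? ≠ some c) (hp : p ≠ some c) :
    scanA p (List.replicate k c ++ rest) =
      if k = 3 then String.mk [c, c, c] else scanA (some c) rest := by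
  match k with
  | 0 => omega
  | 1 =>
    match rest with
    | [] => simp [scanA]
    | [x] => simp [scanA]
    | x :: y :: t =>
      have hx : x ≠ c := by simpa using hr
      simp [scanA, hx]
  | 2 =>
    match rest with
    | [] => simp [scanA]
    | x :: t =>
      have hx : x ≠ c := by simpa using hr
      simp only [List.replicate, List.cons_append, List.nil_append]
      simp [scanA, hx]
      rw [scanA_cons_self]
  | 3 =>
    simp only [List.replicate, List.cons_append, List.nil_append]
    rw [scanA]
    simp [hp, hr]
  | (n+4) =>
    have hhead : (List.replicate (n+1) c ++ rest).head? = some c := by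
      simp [List.replicate_succ]
    have : List.replicate (n+4) c ++ rest
        = c :: c :: c :: (List.replicate (n+1) c ++ rest) := by
      simp only [show n+4 = 3 + (n+1) by omega, List.replicate_add]
      simp [List.replicate]
    rw [this, scanA]
    simp only [hhead, ne_eq, not_true_eq_false, and_false, if_false]
    rw [scanA_cons_self, scanA_cons_self, scanA_replicate_prev]
    simp [show n + 4 ≠ 3 by omega]

theorem head?_dropWhile_ne (p : Char → Bool) (l : List Char) (x : Char)
    (h : (l.dropWhile p).head? = some x) : p x = false := by
  induction l with
  | nil => simp [List.dropWhile] at h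
  | cons a t ih =>
    rw [List.dropWhile_cons] at h
    split at h
    · exact ih h
    · simp at h
      subst h
      simp_all

theorem takeWhile_eq_replicate (l : List Char) (c : Char) :
    l.takeWhile (· == c) = List.replicate (l.takeWhile (· == c)).length c := by
  rw [List.eq_replicate_iff]
  refine ⟨rfl, fun b hb => ?_⟩
  have := List.mem_takeWhile_imp hb
  simpa using this

theorem scanA_eq_loopB (n : Nat) (cs : List Char) (hn : cs.length ≤ n) (p : Option Char)
    (hp : ∀ c, cs.head? = some c → p ≠ some c) :
    scanA p cs = goodIntLoopB cs := by
  induction n generalizing cs p with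
  | zero =>
    have : cs = [] := by
      cases cs with
      | nil => rfl
      | cons a t => simp at hn
    subst this
    simp [scanA, goodIntLoopB]
  | succ n ih =>
    cases cs with
    | nil => simp [scanA, goodIntLoopB]
    | cons d rest =>
      have hdec : d :: rest
          = List.replicate ((rest.takeWhile (· == d)).length + 1) d ++ rest.dropWhile (· == d) := by
        rw [List.replicate_succ, List.cons_append]
        conv_lhs => rw [show rest = rest.takeWhile (· == d) ++ rest.dropWhile (· == d) from
          (List.takeWhile_append_dropWhile).symm]
        rw [congrArg (· ++ rest.dropWhile (· == d)) (takeWhile_eq_replicate rest d)]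
      have hr : (rest.dropWhile (· == d)).head? ≠ some d := by
        intro hcon
        have := head?_dropWhile_ne (· == d) rest d hcon
        simp at this
      have hpd : p ≠ some d := hp d rfl
      have hB : goodIntLoopB (d :: rest) =
          if (rest.takeWhile (· == d)).length + 1 = 3 then String.mk [d, d, d]
          else goodIntLoopB (rest.dropWhile (· == d)) := by
        rw [goodIntLoopB.eq_def]
      rw [hB]
      conv_lhs => rw [hdec]
      rw [scanA_run d _ _ p (by omega) hr hpd]
      split
      · rfl
      · refine ih (rest.dropWhile (· == d)) ?_ (some d) ?_
        · have := rest.length_dropWhile_le (· == d)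
          simp at hn
          omega
        · intro c hc hcon
          have := head?_dropWhile_ne (· == d) rest c hc
          simp at this
          simp at hcon
          exact this hcon.symm

theorem goodIntLoopA_eq_scanA (n : Nat) (cs : List Char) (i : Nat) (hn : cs.length - i ≤ n) :
    goodIntLoopA cs i
      = scanA (if i = 0 then none else some (cs.getD (i-1) ' ')) (cs.drop i) := by
  induction n generalizing i with
  | zero =>
    rw [goodIntLoopA]
    rw [if_neg (by omega)]
    rw [scanA_short _ _ (by simp [List.length_drop]; omega)]
  | succ n ih =>
    rw [goodIntLoopA]
    by_cases hlt : i + 2 < cs.length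
    · rw [if_pos hlt]
      have h0 : i < cs.length := by omega
      have h1 : i + 1 < cs.length := by omega
      have hdrop : cs.drop i = cs[i] :: cs[i+1] :: cs[i+2] :: cs.drop (i+3) := by
        rw [List.drop_eq_getElem_cons h0, List.drop_eq_getElem_cons h1,
            List.drop_eq_getElem_cons hlt]
      have g0 : cs.getD i ' ' = cs[i] := List.getD_eq_getElem cs ' ' h0
      have g1 : cs.getD (i+1) ' ' = cs[i+1] := List.getD_eq_getElem cs ' ' h1
      have g2 : cs.getD (i+2) ' ' = cs[i+2] := List.getD_eq_getElem cs ' ' hlt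
      have hrec : goodIntLoopA cs (i+1)
          = scanA (some cs[i]) (cs[i+1] :: cs[i+2] :: cs.drop (i+3)) := by
        rw [ih (i+1) (by omega)]
        rw [if_neg (by omega)]
        simp only [Nat.add_sub_cancel, g0]
        rw [List.drop_eq_getElem_cons h1, List.drop_eq_getElem_cons hlt]
      rw [hdrop, scanA]
      by_cases hc1 : cs[i+1] = cs[i] ∧ cs[i+2] = cs[i]
      · rw [if_neg (by rw [g0, g1, g2]; simp [hc1.1, hc1.2])]
        have hnext : ((cs.drop (i+3)).head? ≠ some cs[i])
            ↔ (cs.length ≤ i + 3 ∨ cs.getD (i+3) ' ' ≠ cs[i]) := by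
          rw [List.head?_drop]
          by_cases h3 : i + 3 < cs.length
          · rw [List.getElem?_eq_getElem h3, List.getD_eq_getElem cs ' ' h3]
            simp
            omega
          · rw [List.getElem?_eq_none (by omega)]
            simp
            omega
        have hprev : ((if i = 0 then none else some (cs.getD (i-1) ' ')) ≠ some cs[i])
            ↔ (i = 0 ∨ cs.getD (i-1) ' ' ≠ cs[i]) := by
          by_cases hi : i = 0
          · simp [hi]
          · simp [hi]
        by_cases hc2 : (i = 0 ∨ cs.getD (i-1) ' ' ≠ cs.getD i ' ')
            ∧ (cs.length ≤ i + 3 ∨ cs.getD (i+3) ' ' ≠ cs.getD i ' ')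
        · rw [if_pos hc2]
          rw [if_pos ⟨hc1.1, hc1.2, hprev.mpr (g0 ▸ hc2.1), hnext.mpr (g0 ▸ hc2.2)⟩]
          rw [g0]
        · rw [if_neg hc2]
          rw [if_neg (by
            intro hcon
            exact hc2 ⟨g0 ▸ hprev.mp hcon.2.2.1, g0 ▸ hnext.mp hcon.2.2.2⟩)]
          exact hrec
      · rw [if_pos (by
          rw [g0, g1, g2]
          by_cases ha : cs[i+1] = cs[i]
          · right; intro hb; exact hc1 ⟨ha, hb⟩
          · left; exact ha)]
        rw [if_neg (by intro hcon; exact hc1 ⟨hcon.1, hcon.2.1⟩)]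
        exact hrec
    · rw [if_neg hlt]
      rw [scanA_short _ _ (by simp [List.length_drop]; omega)]

-- ===== VERDICT (by name: the statement is the Claim_ definition above) =====
theorem good_integer_spec : Claim_equal_good_integer := by
  intro value _
  unfold Spec_good_integer good_integer good_integer_alt
  have hmain : goodIntLoopA (PySem.Int.toStr value).toList 0
      = goodIntLoopB (PySem.Int.toStr value).toList := by
    rw [goodIntLoopA_eq_scanA (PySem.Int.toStr value).toList.length _ 0 (by omega)]
    simp only [List.drop_zero]
    exact scanA_eq_loopB _ _ le_rfl none (by simp)
  by_cases h : (PySem.Int.toStr value).toList.length < 3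
  · rw [if_pos h, ← hmain, goodIntLoopA, if_neg (by omega)]
  · rw [if_neg h]
    exact hmain
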